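-- pv_equiv track=rewrite | github.com/maikunari/kantan-health-v3 | deprecated_scripts/add_specific_provider_old.py | _find_best_name_match
-- ===== SOURCE A (Python) =====
-- from typing import Optional, Dict, List
--
-- def _find_best_name_match(target_name: str, search_results: List[Dict]) -> Optional[Dict]:
--     """Find the best name match from search results"""
--     target_lower = target_name.lower()
--     best_match = None
--     best_score = 0
--
--     for result in search_results:
--         result_name = result.get('name', '').lower()
--
--         # Exact match
--         if target_lower == result_name:
--             return result
--
--         # Contains match
--         if target_lower in result_name or result_name in target_lower:
--             # Calculate simple similarity score
--             score = len(set(target_lower.split()) & set(result_name.split()))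
--             if score > best_score:
--                 best_score = score
--                 best_match = result
--
--     # Only return if we have a reasonable match
--     return best_match if best_score >= 2 else None
-- ===== SOURCE B (Python) =====
-- from typing import Optional, Dict, List
--
-- def _find_best_name_match(target_name: str, search_results: List[Dict]) -> Optional[Dict]:
--     """Find the best name match from search results (exact match first, then best overlap)."""
--     target_lower = target_name.lower()
--     target_words = set(target_lower.split())
--
--     def name_of(result):
--         return result.get('name', '').lower()
--
--     def score(result):
--         return len(target_words & set(name_of(result).split()))
--
--     # Exact match short-circuit: first result whose lowered name equals the target.
--     for result in search_results:
--         if name_of(result) == target_lower: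
--             return result
--
--     # Candidates related by containment; best = first maximal overlap score.
--     candidates = [r for r in search_results
--                   if target_lower in name_of(r) or name_of(r) in target_lower]
--     best = max(candidates, key=score, default=None)
--     return best if best is not None and score(best) >= 2 else None
-- ===== Notes on version B (the rewrite author's own statement) =====
-- stated objective: simpler
-- what changed: A's single loop threading a (best_match, best_score) accumulator with an in-loop early return is decomposed into three stock steps: a find-first scan for an exact lowercased-name match, a filter for containment candidates, and Python's max(..., key=score, default=None) with a final score >= 2 check. B also hoists the target word-set out of the loop (A rebuilds set(target_lower.split()) for every candidate), a constant-factor speedup.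
import Mathlib
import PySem

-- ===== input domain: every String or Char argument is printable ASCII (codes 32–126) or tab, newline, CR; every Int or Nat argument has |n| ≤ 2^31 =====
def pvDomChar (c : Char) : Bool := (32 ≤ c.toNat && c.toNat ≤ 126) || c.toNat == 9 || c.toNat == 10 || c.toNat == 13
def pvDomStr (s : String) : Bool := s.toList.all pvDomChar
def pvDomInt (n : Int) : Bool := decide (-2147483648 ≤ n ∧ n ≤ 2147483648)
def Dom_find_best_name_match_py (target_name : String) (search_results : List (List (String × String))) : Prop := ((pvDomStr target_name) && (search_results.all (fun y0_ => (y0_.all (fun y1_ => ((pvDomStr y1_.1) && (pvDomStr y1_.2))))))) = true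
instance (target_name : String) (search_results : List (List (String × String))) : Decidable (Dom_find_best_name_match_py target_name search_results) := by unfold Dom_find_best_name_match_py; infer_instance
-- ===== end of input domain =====

-- B is a simpler decomposition of A: an exact-match scan, then max-by-score over the
-- containment candidates, instead of A's single loop threading (best_match, best_score).

-- ===== PORT A =====
-- A's single loop: early return on exact match, else thread (best_match, best_score).
def pvA_loop (tl : String) (rs : List (List (String × String)))
    (best : Option (List (String × String))) (bs : Int) : Option (List (String × String)) :=
  match rs with
  | [] => if bs ≥ 2 then best else none
  | r :: rest =>
    let rn := PySem.Str.lower (PySem.Dict.getD (PySem.Dict.mk r) "name" "")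
    if tl == rn then some r
    else if PySem.Str.isIn tl rn || PySem.Str.isIn rn tl then
      let score := PySem.Set.len (PySem.Set.inter (PySem.Set.ofList (PySem.Str.split₀ tl))
        (PySem.Set.ofList (PySem.Str.split₀ rn)))
      if score > bs then pvA_loop tl rest (some r) score
      else pvA_loop tl rest best bs
    else pvA_loop tl rest best bs

def find_best_name_match_py (target_name : String) (search_results : List (List (String × String))) : Option (List (String × String)) :=
  pvA_loop (PySem.Str.lower target_name) search_results none 0

-- ===== PORT B =====
-- result.get('name', '').lower()
def pvB_name (r : List (String × String)) : String :=
  PySem.Str.lower (PySem.Dict.getD (PySem.Dict.mk r) "name" "")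

-- len(target_words & set(name_of(result).split()))
def pvB_score (tw : PySem.Set String) (r : List (String × String)) : Int :=
  PySem.Set.len (PySem.Set.inter tw (PySem.Set.ofList (PySem.Str.split₀ (pvB_name r))))

def find_best_name_match_py_alt (target_name : String) (search_results : List (List (String × String))) : Option (List (String × String)) :=
  let tl := PySem.Str.lower target_name
  let tw := PySem.Set.ofList (PySem.Str.split₀ tl)
  match search_results.find? (fun r => pvB_name r == tl) with
  | some r => some r
  | none =>
    let cands := search_results.filter
      (fun r => PySem.Str.isIn tl (pvB_name r) || PySem.Str.isIn (pvB_name r) tl)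
    match cands with
    | [] => none   -- max(..., default=None) on an empty candidate list
    | c :: cs =>
      let best := PySem.List.maxD (c :: cs) (pvB_score tw) c
      if pvB_score tw best ≥ 2 then some best else none

-- ===== PRECONDITION & SPEC =====
def Spec_find_best_name_match_py (target_name : String) (search_results : List (List (String × String))) (out : Option (List (String × String))) : Prop := out = find_best_name_match_py_alt target_name search_results
instance (target_name : String) (search_results : List (List (String × String))) (out : Option (List (String × String))) : Decidable (Spec_find_best_name_match_py target_name search_results out) := by unfold Spec_find_best_name_match_py; infer_instance

-- ===== CLAIM (what is proved, stated in full; the proofs are below) =====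
def Claim_equal_find_best_name_match_py : Prop := ∀ (target_name : String) (search_results : List (List (String × String))), Dom_find_best_name_match_py target_name search_results → Spec_find_best_name_match_py target_name search_results (find_best_name_match_py target_name search_results)

-- ===== LEMMAS AND PROOFS =====

-- abbreviations used only by the proofs
def pvCont (tl : String) (r : List (String × String)) : Bool :=
  PySem.Str.isIn tl (pvB_name r) || PySem.Str.isIn (pvB_name r) tl

def pvSc (tl : String) (r : List (String × String)) : Int :=
  pvB_score (PySem.Set.ofList (PySem.Str.split₀ tl)) r

-- A's loop body on a non-exact element, as a fold step
def pvStep (tl : String) (p : Option (List (String × String)) × Int) (r : List (String × String)) :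
    Option (List (String × String)) × Int :=
  if pvCont tl r then (if pvSc tl r > p.2 then (some r, pvSc tl r) else p) else p

-- the candidates-only fold step
def pvStep' (tl : String) (p : Option (List (String × String)) × Int) (r : List (String × String)) :
    Option (List (String × String)) × Int :=
  if pvSc tl r > p.2 then (some r, pvSc tl r) else p

-- Python max's first-maximal fold
def pvMaxStep (tl : String) (m r : List (String × String)) : List (String × String) :=
  if pvSc tl m < pvSc tl r then r else m

lemma pvSc_nonneg (tl : String) (r : List (String × String)) : 0 ≤ pvSc tl r := by
  simp [pvSc, pvB_score, PySem.Set.len]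

-- A's loop = find? for the exact match, else the pvStep fold finished by the ≥ 2 check
lemma pvA_loop_eq (tl : String) (rs : List (List (String × String)))
    (best : Option (List (String × String))) (bs : Int) :
    pvA_loop tl rs best bs =
      match rs.find? (fun r => tl == pvB_name r) with
      | some r => some r
      | none =>
        if (rs.foldl (pvStep tl) (best, bs)).2 ≥ 2 then (rs.foldl (pvStep tl) (best, bs)).1
        else none := by
  induction rs generalizing best bs with
  | nil => simp [pvA_loop]
  | cons r rest ih =>
    rw [show pvA_loop tl (r :: rest) best bs =
      (if (tl == pvB_name r) = true then some r
       else if pvCont tl r = true then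
         (if pvSc tl r > bs then pvA_loop tl rest (some r) (pvSc tl r)
          else pvA_loop tl rest best bs)
       else pvA_loop tl rest best bs) from rfl]
    by_cases hex : (tl == pvB_name r) = true
    · rw [if_pos hex, List.find?_cons_of_pos (p := fun r => tl == pvB_name r) hex]
    · rw [if_neg hex, List.find?_cons_of_neg (p := fun r => tl == pvB_name r) (by simpa using hex), List.foldl_cons]
      by_cases hc : pvCont tl r = true
      · rw [if_pos hc]
        by_cases hs : pvSc tl r > bs
        · rw [if_pos hs, ih,
            show pvStep tl (best, bs) r = (some r, pvSc tl r) from by simp [pvStep, hc, hs]]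
        · rw [if_neg hs, ih,
            show pvStep tl (best, bs) r = (best, bs) from by simp [pvStep, hc, hs]]
      · rw [if_neg hc, ih,
          show pvStep tl (best, bs) r = (best, bs) from by simp [pvStep, hc]]

-- once the accumulator holds a candidate with its own score, the fold tracks Python max
lemma pvFold_some (tl : String) (cs : List (List (String × String))) (c : List (String × String)) :
    cs.foldl (pvStep' tl) (some c, pvSc tl c) =
      (some (cs.foldl (pvMaxStep tl) c), pvSc tl (cs.foldl (pvMaxStep tl) c)) := by
  induction cs generalizing c with
  | nil => simp
  | cons a as ih =>
    rw [List.foldl_cons, List.foldl_cons]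
    by_cases h : pvSc tl c < pvSc tl a
    · rw [show pvStep' tl (some c, pvSc tl c) a = (some a, pvSc tl a) from by simp [pvStep', h],
        show pvMaxStep tl c a = a from by simp [pvMaxStep, h]]
      exact ih a
    · rw [show pvStep' tl (some c, pvSc tl c) a = (some c, pvSc tl c) from by simp [pvStep', h],
        show pvMaxStep tl c a = c from by simp [pvMaxStep, h]]
      exact ih c

-- the running max never decreases the score of the seed
lemma pvSc_le_foldl (tl : String) (cs : List (List (String × String))) (c : List (String × String)) :
    pvSc tl c ≤ pvSc tl (cs.foldl (pvMaxStep tl) c) := by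
  induction cs generalizing c with
  | nil => simp
  | cons a as ih =>
    rw [List.foldl_cons]
    by_cases h : pvSc tl c < pvSc tl a
    · rw [show pvMaxStep tl c a = a from by simp [pvMaxStep, h]]
      exact le_trans (le_of_lt h) (ih a)
    · rw [show pvMaxStep tl c a = c from by simp [pvMaxStep, h]]
      exact ih c

-- from the empty accumulator with a zero-score seed candidate
lemma pvFold_zero (tl : String) (cs : List (List (String × String))) (c : List (String × String))
    (h0 : pvSc tl c = 0) :
    cs.foldl (pvStep' tl) (none, 0) =
      (if 1 ≤ pvSc tl (cs.foldl (pvMaxStep tl) c)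
       then (some (cs.foldl (pvMaxStep tl) c), pvSc tl (cs.foldl (pvMaxStep tl) c))
       else (none, 0)) := by
  induction cs generalizing c with
  | nil => simp [h0]
  | cons a as ih =>
    rw [List.foldl_cons, List.foldl_cons]
    by_cases h : 1 ≤ pvSc tl a
    · rw [show pvStep' tl (none, 0) a = (some a, pvSc tl a) from by
          simp [pvStep']; omega,
        show pvMaxStep tl c a = a from by simp [pvMaxStep]; omega,
        pvFold_some tl as a,
        if_pos (le_trans h (pvSc_le_foldl tl as a))]
    · have ha0 : pvSc tl a = 0 := le_antisymm (by omega) (pvSc_nonneg tl a)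
      rw [show pvStep' tl (none, 0) a = (none, 0) from by simp [pvStep']; omega,
        show pvMaxStep tl c a = c from by simp [pvMaxStep]; omega]
      exact ih c h0

lemma pvMax?_cons (tl : String) (cs : List (List (String × String))) (c : List (String × String)) :
    PySem.List.max? (c :: cs) (pvSc tl) = some (cs.foldl (pvMaxStep tl) c) := by
  induction cs generalizing c with
  | nil => simp [PySem.List.max?]
  | cons a as ih =>
    have h1 : PySem.List.max? (c :: a :: as) (pvSc tl)
        = PySem.List.max? ((if pvSc tl c < pvSc tl a then a else c) :: as) (pvSc tl) := by
      simp only [PySem.List.max?, List.foldl_cons]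
      by_cases h : pvSc tl c < pvSc tl a <;> simp [h]
    rw [h1]
    by_cases h : pvSc tl c < pvSc tl a
    · rw [if_pos h, ih a, List.foldl_cons,
        show pvMaxStep tl c a = a from by simp [pvMaxStep, h]]
    · rw [if_neg h, ih c, List.foldl_cons,
        show pvMaxStep tl c a = c from by simp [pvMaxStep, h]]

lemma pvMaxD_cons (tl : String) (c : List (String × String)) (cs : List (List (String × String))) :
    PySem.List.maxD (c :: cs) (pvSc tl) c = cs.foldl (pvMaxStep tl) c := by
  simp only [PySem.List.maxD]
  rw [pvMax?_cons tl cs c]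
  rfl

-- ===== VERDICT (by name: the statement is the Claim_ definition above) =====
theorem find_best_name_match_py_spec : Claim_equal_find_best_name_match_py := by
  intro target_name search_results _
  unfold Spec_find_best_name_match_py
  rw [show find_best_name_match_py target_name search_results
      = pvA_loop (PySem.Str.lower target_name) search_results none 0 from rfl]
  rw [show find_best_name_match_py_alt target_name search_results
      = (match search_results.find?
            (fun r => pvB_name r == PySem.Str.lower target_name) with
         | some r => some r
         | none =>
           match search_results.filter
               (fun r => PySem.Str.isIn (PySem.Str.lower target_name) (pvB_name r)
                 || PySem.Str.isIn (pvB_name r) (PySem.Str.lower target_name)) with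
           | [] => none
           | c :: cs =>
             if pvSc (PySem.Str.lower target_name)
                  (PySem.List.maxD (c :: cs) (pvSc (PySem.Str.lower target_name)) c) ≥ 2
             then some (PySem.List.maxD (c :: cs) (pvSc (PySem.Str.lower target_name)) c)
             else none) from rfl]
  set tl := PySem.Str.lower target_name with htl
  rw [pvA_loop_eq]
  rw [show search_results.find? (fun r => tl == pvB_name r)
      = search_results.find? (fun r => pvB_name r == tl) from by
    congr 1; funext r; simp [eq_comm]]
  cases hx : search_results.find? (fun r => pvB_name r == tl) with
  | some r => rfl
  | none =>
    simp only
    have hfilter : search_results.foldl (pvStep tl) (none, 0)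
        = (search_results.filter
            (fun r => PySem.Str.isIn tl (pvB_name r) || PySem.Str.isIn (pvB_name r) tl)).foldl
            (pvStep' tl) (none, 0) := by
      rw [List.foldl_filter]
      congr 1
    rw [hfilter]
    cases hc : search_results.filter
        (fun r => PySem.Str.isIn tl (pvB_name r) || PySem.Str.isIn (pvB_name r) tl) with
    | nil => rfl
    | cons c cs =>
      simp only
      rw [pvMaxD_cons tl c cs]
      have hge : (0:Int) ≤ pvSc tl c := pvSc_nonneg tl c
      by_cases h0 : pvSc tl c = 0
      · rw [List.foldl_cons,
          show pvStep' tl (none, 0) c = (none, 0) from by simp [pvStep']; omega,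
          pvFold_zero tl cs c h0]
        by_cases h1 : 1 ≤ pvSc tl (cs.foldl (pvMaxStep tl) c)
        · rw [if_pos h1]
        · rw [if_neg h1, if_neg (by omega : ¬ ((none, (0:Int)) :
              Option (List (String × String)) × Int).2 ≥ 2),
            if_neg (by omega : ¬ pvSc tl (cs.foldl (pvMaxStep tl) c) ≥ 2)]
      · rw [List.foldl_cons,
          show pvStep' tl (none, 0) c = (some c, pvSc tl c) from by simp [pvStep']; omega,
          pvFold_some tl cs c]
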